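-- pv_equiv track=rewrite | github.com/luisek/codility | MaxSlice/maxSlice.py | stock_profit
-- ===== SOURCE A (Python) =====
-- def stock_profit(A):
--     n = len(A)
--     result = 0
--     for p in range(n):
--         profit = A[p]
--         for q in range(p+1, n):
--             profit -= A[q]
--             result = max(result, profit)
--     return result
-- ===== SOURCE B (Python) =====
-- def stock_profit(A):
--     # One pass with prefix sums: profit(p,q) = (s_p + 2*A[p]) - s_{q+1};
--     # keep the best (s_p + 2*A[p]) seen so far.
--     result = 0
--     s = 0
--     best = None
--     for x in A:
--         if best is not None:
--             cur = best - (s + x)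
--             if cur > result:
--                 result = cur
--         cand = s + 2 * x
--         if best is None or cand > best:
--             best = cand
--         s += x
--     return result
-- ===== Notes on version B (the rewrite author's own statement) =====
-- stated objective: faster
-- what changed: Replaced the quadratic double loop over all pairs (p,q) by a single pass that maintains the running prefix sum and the best value of s_p + 2*A[p], from which each pair profit is recovered as best - s_{q+1}.
import Mathlib
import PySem

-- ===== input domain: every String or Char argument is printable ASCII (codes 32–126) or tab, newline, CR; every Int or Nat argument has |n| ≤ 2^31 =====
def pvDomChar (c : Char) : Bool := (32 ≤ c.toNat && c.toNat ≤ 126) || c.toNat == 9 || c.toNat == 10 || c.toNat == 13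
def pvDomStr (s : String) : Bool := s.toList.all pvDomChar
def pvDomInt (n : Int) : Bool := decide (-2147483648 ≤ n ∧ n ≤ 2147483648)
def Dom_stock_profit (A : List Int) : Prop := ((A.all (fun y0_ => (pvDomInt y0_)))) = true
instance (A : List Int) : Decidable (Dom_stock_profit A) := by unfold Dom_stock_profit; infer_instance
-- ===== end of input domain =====

-- B replaces A's quadratic double loop by a single pass over prefix sums (asymptotic speed-up).

-- ===== PORT A =====
-- Literal port of A's nested loops; indices p, q always lie in range, so A[p]/A[q] is pyGetD (exact here).
def stock_profit (A : List Int) : Int :=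
  let n : Int := (A.length : Int)
  (PySem.List.pyRange 0 n 1).foldl
    (fun result p =>
      ((PySem.List.pyRange (p + 1) n 1).foldl
        (fun (st : Int × Int) q =>
          let profit := st.1 - PySem.List.pyGetD A q 0
          (profit, max st.2 profit))
        (PySem.List.pyGetD A p 0, result)).2)
    0

-- ===== PORT B =====
-- one iteration of B's loop body (result, s, best)
def altStep (st : Int × Int × Option Int) (x : Int) : Int × Int × Option Int :=
  match st with
  | (result, s, best) =>
    let result :=
      match best with
      | some b => if b - (s + x) > result then b - (s + x) else result
      | none => result
    let cand := s + 2 * x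
    let best :=
      match best with
      | none => some cand
      | some b => if cand > b then some cand else some b
    (result, s + x, best)

def stock_profit_alt (A : List Int) : Int :=
  (A.foldl altStep (0, 0, none)).1

-- ===== PRECONDITION & SPEC =====
def Spec_stock_profit (A : List Int) (out : Int) : Prop := out = stock_profit_alt A
instance (A : List Int) (out : Int) : Decidable (Spec_stock_profit A out) := by unfold Spec_stock_profit; infer_instance

-- ===== CLAIM (what is proved, stated in full; the proofs are below) =====
def Claim_equal_stock_profit : Prop := ∀ (A : List Int), Dom_stock_profit A → Spec_stock_profit A (stock_profit A)

-- ===== LEMMAS AND PROOFS =====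

-- max of r with an optional value
def omax (r : Int) (o : Option Int) : Int := match o with | none => r | some k => max r k
-- max of two optional values (none = identity)
def oomax (a b : Option Int) : Option Int :=
  match a, b with
  | none, b => b
  | a, none => a
  | some u, some v => some (max u v)

-- K pr xs = max over nonempty prefixes of xs of (pr - sum of the prefix)
def K (pr : Int) : List Int → Option Int
  | [] => none
  | y :: ys => some (omax (pr - y) (K (pr - y) ys))

-- best pair profit over all pairs p < q
def bp : List Int → Option Int
  | [] => none
  | x :: xs => oomax (K x xs) (bp xs)

-- A's inner-loop step
def g (st : Int × Int) (y : Int) : Int × Int := (st.1 - y, max st.2 (st.1 - y))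

-- A's outer loop, recursively over suffixes
def ARec (r : Int) : List Int → Int
  | [] => r
  | x :: xs => ARec (omax r (K x xs)) xs

-- B's loop, recursively
def BRec (r s : Int) (b : Option Int) : List Int → Int
  | [] => r
  | x :: xs =>
    match b with
    | none => BRec r (s + x) (some (s + 2 * x)) xs
    | some b =>
      BRec (if b - (s + x) > r then b - (s + x) else r) (s + x)
        (some (if s + 2 * x > b then s + 2 * x else b)) xs

lemma inner_eq (xs : List Int) : ∀ pr r : Int, (xs.foldl g (pr, r)).2 = omax r (K pr xs) := by
  induction xs with
  | nil => intro pr r; simp [omax, K]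
  | cons y ys ih =>
    intro pr r
    simp only [List.foldl_cons, K]
    rw [show g (pr, r) y = (pr - y, max r (pr - y)) from rfl, ih]
    cases h : K (pr - y) ys <;> simp [omax]

lemma ARec_eq (xs : List Int) : ∀ r : Int, ARec r xs = omax r (bp xs) := by
  induction xs with
  | nil => intro r; simp [ARec, omax, bp]
  | cons x ys ih =>
    intro r
    simp only [ARec, bp, ih]
    cases h1 : K x ys <;> cases h2 : bp ys <;> simp [omax, oomax]

lemma K_max (xs : List Int) : ∀ a c : Int, K (max a c) xs = oomax (K a xs) (K c xs) := by
  induction xs with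
  | nil => intro a c; simp [K, oomax]
  | cons y ys ih =>
    intro a c
    simp only [K]
    rw [show max a c - y = max (a - y) (c - y) by omega, ih]
    cases h1 : K (a - y) ys <;> cases h2 : K (c - y) ys <;> simp [omax, oomax] <;> omega

lemma BRec_some (xs : List Int) : ∀ r s b : Int,
    BRec r s (some b) xs = omax r (oomax (K (b - s) xs) (bp xs)) := by
  induction xs with
  | nil => intro r s b; simp [BRec, K, bp, omax, oomax]
  | cons y ys ih =>
    intro r s b
    simp only [BRec, ih, K, bp]
    rw [show (if s + 2 * y > b then s + 2 * y else b) - (s + y) = max (b - s - y) y by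
      split <;> omega, K_max]
    cases h1 : K (b - s - y) ys <;> cases h2 : K y ys <;> cases h3 : bp ys <;>
      simp [omax, oomax] <;> split_ifs <;> omega

lemma BRec_none (xs : List Int) : ∀ r s : Int, BRec r s none xs = omax r (bp xs) := by
  cases xs with
  | nil => intro r s; simp [BRec, bp, omax]
  | cons y ys =>
    intro r s
    simp only [BRec, BRec_some, bp]
    rw [show s + 2 * y - (s + y) = y by omega]

lemma alt_foldl_eq (xs : List Int) : ∀ (r s : Int) (b : Option Int),
    (xs.foldl altStep (r, s, b)).1 = BRec r s b xs := by
  induction xs with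
  | nil => intro r s b; simp [BRec]
  | cons y ys ih =>
    intro r s b
    cases b with
    | none => simp only [List.foldl_cons, altStep, BRec]; exact ih _ _ _
    | some b =>
      simp only [List.foldl_cons, altStep, BRec]
      rw [show (if s + 2 * y > b then some (s + 2 * y) else some b)
            = some (if s + 2 * y > b then s + 2 * y else b) from by split <;> rfl]
      exact ih _ _ _

lemma alt_eq (A : List Int) : stock_profit_alt A = omax 0 (bp A) := by
  rw [stock_profit_alt, alt_foldl_eq, BRec_none]

lemma outer_eq (A : List Int) : ∀ (m k : Nat) (r : Int), m = A.length - k →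
    (PySem.List.pyRange (k : Int) (A.length : Int) 1).foldl
      (fun result p =>
        ((PySem.List.pyRange (p + 1) (A.length : Int) 1).foldl
          (fun (st : Int × Int) q =>
            let profit := st.1 - PySem.List.pyGetD A q 0
            (profit, max st.2 profit))
          (PySem.List.pyGetD A p 0, result)).2)
      r = ARec r (A.drop k) := by
  intro m
  induction m with
  | zero =>
    intro k r hk
    have hlen : A.length ≤ k := by omega
    rw [PySem.List.pyRange_one_eq_nil (by exact_mod_cast hlen), List.drop_eq_nil_of_le hlen]
    simp [ARec]
  | succ m ih =>
    intro k r hk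
    have hkl : k < A.length := by omega
    rw [PySem.List.pyRange_one_cons (by exact_mod_cast hkl), List.foldl_cons]
    have hdrop : A.drop k = A[k] :: A.drop (k + 1) := List.drop_eq_getElem_cons hkl
    rw [hdrop]
    show _ = ARec (omax r (K A[k] (A.drop (k + 1)))) (A.drop (k + 1))
    rw [← ih (k + 1) _ (by omega)]
    have hcast : (k : Int) + 1 = ((k + 1 : Nat) : Int) := by push_cast; ring
    rw [hcast]
    congr 1
    have h1 : PySem.List.pyGetD A ((k : Nat) : Int) 0 = A[k] := by
      rw [PySem.List.pyGetD_natCast]; exact List.getD_eq_getElem A 0 hkl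
    have h2 := PySem.List.foldl_pyRange_pyGetD' A 0 g (PySem.List.pyGetD A ((k:Nat):Int) 0, r)
      (a := ((k + 1 : Nat) : Int)) (by positivity)
    simp only [Int.toNat_natCast] at h2
    calc ((PySem.List.pyRange ((k + 1 : Nat) : Int) (A.length : Int) 1).foldl
            (fun (st : Int × Int) q =>
              let profit := st.1 - PySem.List.pyGetD A q 0
              (profit, max st.2 profit))
            (PySem.List.pyGetD A ((k:Nat):Int) 0, r)).2
        = ((A.drop (k + 1)).foldl g (PySem.List.pyGetD A ((k:Nat):Int) 0, r)).2 := congrArg Prod.snd h2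
      _ = omax r (K (PySem.List.pyGetD A ((k:Nat):Int) 0) (A.drop (k + 1))) := inner_eq _ _ _
      _ = omax r (K A[k] (A.drop (k + 1))) := by rw [h1]

lemma a_eq (A : List Int) : stock_profit A = omax 0 (bp A) := by
  have := outer_eq A A.length 0 0 (by omega)
  simp only [Nat.cast_zero, List.drop_zero] at this
  rw [stock_profit]
  exact this.trans (ARec_eq A 0)

-- ===== VERDICT (by name: the statement is the Claim_ definition above) =====
theorem stock_profit_spec : Claim_equal_stock_profit := by
  intro A _
  unfold Spec_stock_profit
  rw [a_eq, alt_eq]
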